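-- pv_equiv track=rewrite | github.com/HEEE23/programmers | 프로그래머스/3/12987. 숫자 게임/숫자 게임.py | solution
-- ===== SOURCE A (Python) =====
-- def solution(A, B):
--     answer = 0
--
--     A.sort(reverse=True)
--     B.sort(reverse=True)
--
--     while A:
--         if A[0] < B[0]:
--             answer += 1
--             A.pop(0)
--             B.pop(0)
--         else:
--             A.pop(0)
--             B.pop()
--
--     # for a in A:
--     #     if B:
--     #         for i in range(len(B)):
--     #             if a < B[i]:
--     #                 answer += 1
--     #                 B.pop(i)
--     #                 break
--     return answer
-- ===== SOURCE B (Python) =====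
-- def solution(A, B):
--     As = sorted(A, reverse=True)
--     Bs = sorted(B, reverse=True)
--     answer = 0
--     for a in As:
--         if answer < len(Bs) and a < Bs[answer]:
--             answer += 1
--     return answer
-- ===== Notes on version B (the rewrite author's own statement) =====
-- stated objective: faster
-- what changed: Replaced the destructive while-loop with pop(0)/pop() (linear-time pops) by a single pass over sorted A with an index pointer into sorted B, no mutation.
import Mathlib
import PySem

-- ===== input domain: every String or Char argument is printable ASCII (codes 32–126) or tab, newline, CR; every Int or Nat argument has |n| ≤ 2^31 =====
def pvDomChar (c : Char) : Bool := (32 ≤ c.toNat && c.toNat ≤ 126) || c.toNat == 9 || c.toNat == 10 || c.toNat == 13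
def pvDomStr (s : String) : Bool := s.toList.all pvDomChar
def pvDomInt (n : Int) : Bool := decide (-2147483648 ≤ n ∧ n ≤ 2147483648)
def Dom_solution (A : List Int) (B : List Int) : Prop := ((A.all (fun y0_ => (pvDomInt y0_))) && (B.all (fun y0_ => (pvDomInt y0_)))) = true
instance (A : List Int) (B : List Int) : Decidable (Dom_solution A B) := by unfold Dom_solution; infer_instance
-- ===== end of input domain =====

-- B replaces A's quadratic pop(0)/pop() while-loop by one pointer pass over the
-- sorted lists (O(n log n)); return-value equivalence only: Python A sorts and
-- empties its argument lists in place, B does not mutate.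

-- ===== PORT A =====
-- while A: compare heads of the two descending-sorted lists; on a match pop both
-- fronts, otherwise pop A's front and B's back.
def solAGo : List Int → List Int → Int → Int
  | [], _, ans => ans
  | _ :: _, [], _ => 0  -- Python raises IndexError at B[0] here; excluded by Pre_solution
  | a :: as, b :: bs, ans =>
      if a < b then solAGo as bs (ans + 1)
      else solAGo as ((b :: bs).dropLast) ans

def solution (A : List Int) (B : List Int) : Int :=
  solAGo (PySem.List.sorted A (fun x => x) true) (PySem.List.sorted B (fun x => x) true) 0

-- ===== PORT B =====
-- one pass over sorted(A, reverse=True) with index pointer `answer` into sorted(B, reverse=True)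
def solution_alt (A : List Int) (B : List Int) : Int :=
  let Bs := PySem.List.sorted B (fun x => x) true
  (PySem.List.sorted A (fun x => x) true).foldl
    (fun answer a =>
      if answer < (Bs.length : Int) ∧ a < PySem.List.pyGetD Bs answer 0 then answer + 1
      else answer) 0

-- ===== PRECONDITION & SPEC =====
-- Pre_ excludes exactly the inputs where A raises IndexError (B shorter than A).
def Pre_solution (A : List Int) (B : List Int) : Prop := A.length ≤ B.length
instance (A : List Int) (B : List Int) : Decidable (Pre_solution A B) := by
  unfold Pre_solution; infer_instance

def pvWitness_solution : List Int × List Int := ([2, 3], [5, 1, 3])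

def Spec_solution (A : List Int) (B : List Int) (out : Int) : Prop := out = solution_alt A B
instance (A : List Int) (B : List Int) (out : Int) : Decidable (Spec_solution A B out) := by
  unfold Spec_solution; infer_instance

-- ===== CLAIM (what is proved, stated in full; the proofs are below) =====
def Claim_equal_solution : Prop := ∀ (A : List Int) (B : List Int), Dom_solution A B → Pre_solution A B → Spec_solution A B (solution A B)

-- ===== LEMMAS AND PROOFS =====

-- proof-side pointer loop: cGo as bs = number of greedy matches, with B consumed
-- from the front only on a match (and never from the back)
def cGo : List Int → List Int → Int
  | [], _ => 0
  | _ :: _, [] => 0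
  | a :: as, b :: bs => if a < b then 1 + cGo as bs else cGo as (b :: bs)

theorem cGo_nil (as : List Int) : cGo as [] = 0 := by
  cases as <;> simp [cGo]

theorem cGo_dropLast (as : List Int) : ∀ bs : List Int, as.length < bs.length →
    cGo as bs.dropLast = cGo as bs := by
  induction as with
  | nil => intro bs _; rfl
  | cons a as ih =>
    intro bs h
    match bs, h with
    | b :: bs', h =>
      have hne : bs' ≠ [] := by
        intro he; subst he; simp at h
      have hd : (b :: bs').dropLast = b :: bs'.dropLast := by
        simp [List.dropLast_cons_of_ne_nil hne]
      rw [hd]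
      by_cases hab : a < b
      · simp only [cGo, if_pos hab]
        have := ih bs' (by simp at h ⊢; omega)
        omega
      · simp only [cGo, if_neg hab]
        have := ih (b :: bs') (by simp at h ⊢; omega)
        rw [hd] at this
        exact this

theorem solAGo_eq_cGo (as : List Int) : ∀ (bs : List Int) (ans : Int),
    as.length ≤ bs.length → solAGo as bs ans = ans + cGo as bs := by
  induction as with
  | nil => intro bs ans _; cases bs <;> simp [solAGo, cGo]
  | cons a as ih =>
    intro bs ans h
    match bs, h with
    | b :: bs', h =>
      by_cases hab : a < b
      · simp only [solAGo, cGo, if_pos hab]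
        have := ih bs' (ans + 1) (by simpa using h)
        omega
      · simp only [solAGo, cGo, if_neg hab]
        have hlen : as.length < (b :: bs').length := by simp at h ⊢; omega
        have hd : (b :: bs').dropLast.length = bs'.length := by simp
        have := ih ((b :: bs').dropLast) ans (by simp at h ⊢; omega)
        rw [cGo_dropLast as (b :: bs') hlen] at this
        exact this

-- the pointer fold of B's port, on full list pre ++ bs with pointer at pre.length,
-- counts exactly cGo's matches against bs
theorem foldl_eq_cGo (as : List Int) : ∀ (pre bs : List Int),
    as.foldl
      (fun answer a =>
        if answer < (((pre ++ bs).length : Nat) : Int) ∧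
            a < PySem.List.pyGetD (pre ++ bs) answer 0 then answer + 1
        else answer) ((pre.length : Nat) : Int)
      = (pre.length : Int) + cGo as bs := by
  induction as with
  | nil => intro pre bs; cases bs <;> simp [cGo]
  | cons a as ih =>
    intro pre bs
    cases bs with
    | nil =>
      have hcond : ¬ (((pre.length : Nat) : Int) < (((pre ++ ([] : List Int)).length : Nat) : Int) ∧
          a < PySem.List.pyGetD (pre ++ ([] : List Int)) ((pre.length : Nat) : Int) 0) := by
        simp
      rw [List.foldl_cons, if_neg hcond]
      have := ih pre []
      rw [cGo_nil] at this ⊢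
      simpa using this
    | cons b bs' =>
      have hget : PySem.List.pyGetD (pre ++ b :: bs') ((pre.length : Nat) : Int) 0 = b := by
        rw [PySem.List.pyGetD_natCast]
        simp [List.getD]
      by_cases hab : a < b
      · have hcond : (((pre.length : Nat) : Int) < (((pre ++ b :: bs').length : Nat) : Int) ∧
            a < PySem.List.pyGetD (pre ++ b :: bs') ((pre.length : Nat) : Int) 0) := by
          constructor
          · simp
          · rw [hget]; exact hab
        rw [List.foldl_cons, if_pos hcond]
        have happ : pre ++ b :: bs' = (pre ++ [b]) ++ bs' := by simp
        have hlen : ((pre.length : Nat) : Int) + 1 = (((pre ++ [b]).length : Nat) : Int) := by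
          simp
        rw [happ, hlen]
        have := ih (pre ++ [b]) bs'
        rw [this]
        simp only [cGo, if_pos hab, List.length_append, List.length_cons,
          List.length_nil]
        push_cast
        ring
      · have hcond : ¬ (((pre.length : Nat) : Int) < (((pre ++ b :: bs').length : Nat) : Int) ∧
            a < PySem.List.pyGetD (pre ++ b :: bs') ((pre.length : Nat) : Int) 0) := by
          rw [hget]
          intro hc
          exact hab hc.2
        rw [List.foldl_cons, if_neg hcond]
        have := ih pre (b :: bs')
        rw [this]
        simp [cGo, hab]

-- ===== VERDICT (by name: the statement is the Claim_ definition above) =====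
theorem solution_spec : Claim_equal_solution := by
  intro A B _ hpre
  unfold Spec_solution solution solution_alt
  have hlen : (PySem.List.sorted A (fun x => x) true).length ≤
      (PySem.List.sorted B (fun x => x) true).length := by
    rw [PySem.List.length_sorted, PySem.List.length_sorted]
    exact hpre
  rw [solAGo_eq_cGo _ _ 0 hlen]
  have := foldl_eq_cGo (PySem.List.sorted A (fun x => x) true)
    [] (PySem.List.sorted B (fun x => x) true)
  simpa using this.symm
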